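-- pv_equiv track=rewrite | github.com/zuiho-kai/Greyfield | src/greywind/persona/voice_pipeline.py | _strip_think_streaming
-- ===== SOURCE A (Python) =====
-- def _strip_think_streaming(
--     text: str, inside: bool, pending: str = ""
-- ) -> tuple[str, bool, str]:
--     """流式过滤 think block，返回 (过滤后文本, 是否仍在 think block 内, 待定缓冲)。
--
--     逐 chunk 调用，正确处理标签被 chunk 边界拆开的情况（如 ``</thi`` + ``nk>``）。
--     ``pending`` 保存上次 chunk 末尾可能是不完整标签的部分，下次调用时拼接继续解析。
--     """
--     text = pending + text
--     result: list[str] = []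
--     i = 0
--     while i < len(text):
--         if inside:
--             end = text.find("</think>", i)
--             if end == -1:
--                 # 检查末尾是否有 </think> 的不完整前缀
--                 for k in range(min(len("</think>") - 1, len(text) - i), 0, -1):
--                     if "</think>"[:k] == text[-k:]:
--                         return "".join(result), True, text[-k:]
--                 break  # 整个 chunk 都在 think block 内，全部丢弃
--             i = end + len("</think>")
--             inside = False
--         else:
--             start = text.find("<think>", i)
--             if start == -1:
--                 # 检查末尾是否有 <think> 的不完整前缀
--                 for k in range(min(len("<think>") - 1, len(text) - i), 0, -1):
--                     if "<think>"[:k] == text[-k:]: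
--                         result.append(text[i:-k])
--                         return "".join(result), False, text[-k:]
--                 result.append(text[i:])
--                 break
--             result.append(text[i:start])
--             i = start + len("<think>")
--             inside = True
--     return "".join(result), inside, ""
-- ===== SOURCE B (Python) =====
-- def _strip_think_streaming(
--     text: str, inside: bool, pending: str = ""
-- ) -> tuple[str, bool, str]:
--     """Character-level FSM: tracks a partial match of the current tag
--     ('<think>' when outside, '</think>' when inside) in buf; no str.find."""
--     result: list[str] = []
--     buf: list[str] = []
--     for ch in pending + text:
--         tag = "</think>" if inside else "<think>"
--         if ch == tag[len(buf)]:
--             buf.append(ch)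
--             if len(buf) == len(tag):
--                 inside = not inside
--                 buf = []
--         else:
--             if not inside:
--                 result.extend(buf)
--             if ch == tag[0]:
--                 buf = [ch]
--             else:
--                 buf = []
--                 if not inside:
--                     result.append(ch)
--     return "".join(result), inside, "".join(buf)
-- ===== Notes on version B (the rewrite author's own statement) =====
-- stated objective: alternative
-- what changed: Replaced A's str.find scanning with repeated whole-tag searches and a descending trailing-prefix loop by a single character-level finite state machine that tracks the partial tag match in a buffer and the inside flag per character.
import Mathlib
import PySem

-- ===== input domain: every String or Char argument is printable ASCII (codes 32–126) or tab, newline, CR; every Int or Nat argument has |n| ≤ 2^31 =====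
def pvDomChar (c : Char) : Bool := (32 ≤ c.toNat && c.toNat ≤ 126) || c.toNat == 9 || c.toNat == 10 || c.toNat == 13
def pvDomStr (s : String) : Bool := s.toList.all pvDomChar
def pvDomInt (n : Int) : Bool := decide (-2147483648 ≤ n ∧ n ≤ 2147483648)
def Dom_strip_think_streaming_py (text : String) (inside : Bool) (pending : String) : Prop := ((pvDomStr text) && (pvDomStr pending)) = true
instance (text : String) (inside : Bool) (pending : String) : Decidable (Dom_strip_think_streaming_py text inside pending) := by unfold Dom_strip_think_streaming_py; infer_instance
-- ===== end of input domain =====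

-- B replaces A's str.find scanning with a character-level finite state machine (objective: alternative
-- algorithm, similar cost); equivalence is proved for all inputs (no Pre_ — A is total).

-- ===== PORT A =====
-- "<think>" / "</think>" as character lists
def pvTagO : List Char := ['<', 't', 'h', 'i', 'n', 'k', '>']
def pvTagI : List Char := ['<', '/', 't', 'h', 'i', 'n', 'k', '>']

-- port of Python str.find(sub, i) (none = -1): first j ≥ i where sub occurs
def pvFindFrom (t sub : List Char) (i : Nat) : Option Nat :=
  if i + sub.length ≤ t.length then
    if sub.isPrefixOf (t.drop i) then some i
    else pvFindFrom t sub (i + 1)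
  else none
termination_by t.length + 1 - i

-- bounds fact the main loop's termination needs
theorem pvFindFrom_bounds (t sub : List Char) (i : Nat) :
    ∀ j, pvFindFrom t sub i = some j → i ≤ j ∧ j + sub.length ≤ t.length := by
  induction i using pvFindFrom.induct t sub with
  | case1 i hle hpre =>
    intro j h; rw [pvFindFrom, if_pos hle, if_pos hpre] at h
    cases h; exact ⟨le_refl _, hle⟩
  | case2 i hle hpre ih =>
    intro j h; rw [pvFindFrom, if_pos hle, if_neg hpre] at h
    have := ih j h; omega
  | case3 i hle =>
    intro j h; rw [pvFindFrom, if_neg hle] at h; cases h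

-- port of A's `for k in range(K, 0, -1): if tag[:k] == text[-k:]: ...` (0 = no k found; text[-k:] = drop (len-k))
def pvKLoop (tag t : List Char) : Nat → Nat
  | 0 => 0
  | (k + 1) => if tag.take (k + 1) = t.drop (t.length - (k + 1)) then k + 1 else pvKLoop tag t k

-- A's while loop; i is the scan index into the concatenated text
def pvALoop (t : List Char) (i : Nat) (inside : Bool) (acc : List Char) : List Char × Bool × List Char :=
  if hlt : i < t.length then
    if inside then
      match h : pvFindFrom t pvTagI i with
      | none =>
        let k := pvKLoop pvTagI t (min (pvTagI.length - 1) (t.length - i))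
        if k = 0 then (acc, true, [])
        else (acc, true, t.drop (t.length - k))
      | some e => pvALoop t (e + pvTagI.length) false acc
    else
      match h : pvFindFrom t pvTagO i with
      | none =>
        let k := pvKLoop pvTagO t (min (pvTagO.length - 1) (t.length - i))
        if k = 0 then (acc ++ t.drop i, false, [])
        else (acc ++ (t.drop i).take (t.length - k - i), false, t.drop (t.length - k))
      | some s => pvALoop t (s + pvTagO.length) true (acc ++ (t.drop i).take (s - i))
  else (acc, inside, [])
termination_by t.length - i
decreasing_by
  · have := pvFindFrom_bounds t pvTagI i e h; simp [pvTagI] at this ⊢; omega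
  · have := pvFindFrom_bounds t pvTagO i s h; simp [pvTagO] at this ⊢; omega

def strip_think_streaming_py (text : String) (inside : Bool) (pending : String) : String × Bool × String :=
  let t := pending.toList ++ text.toList
  let r := pvALoop t 0 inside []
  (String.mk r.1, r.2.1, String.mk r.2.2)

-- ===== PORT B =====
def pvTag : Bool → List Char
  | true => pvTagI
  | false => pvTagO

-- one FSM step on state (inside, buf = matched tag prefix, acc = output)
def pvStep (st : Bool × List Char × List Char) (c : Char) : Bool × List Char × List Char :=
  let inside := st.1
  let buf := st.2.1
  let acc := st.2.2
  let tag := pvTag inside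
  if c = tag.getD buf.length ' ' then
    let buf' := buf ++ [c]
    if buf'.length = tag.length then (!inside, [], acc) else (inside, buf', acc)
  else
    let acc' := if inside then acc else acc ++ buf
    if c = tag.getD 0 ' ' then (inside, [c], acc')
    else (inside, [], if inside then acc' else acc' ++ [c])

def pvFsm (r : List Char) (st : Bool × List Char × List Char) : Bool × List Char × List Char :=
  r.foldl pvStep st

def strip_think_streaming_py_alt (text : String) (inside : Bool) (pending : String) : String × Bool × String :=
  let st := pvFsm (pending.toList ++ text.toList) (inside, [], [])
  (String.mk st.2.2, st.1, String.mk st.2.1)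

-- ===== PRECONDITION & SPEC =====
def Spec_strip_think_streaming_py (text : String) (inside : Bool) (pending : String) (out : String × Bool × String) : Prop := out = strip_think_streaming_py_alt text inside pending
instance (text : String) (inside : Bool) (pending : String) (out : String × Bool × String) : Decidable (Spec_strip_think_streaming_py text inside pending out) := by unfold Spec_strip_think_streaming_py; infer_instance

-- ===== CLAIM (what is proved, stated in full; the proofs are below) =====
def Claim_equal_strip_think_streaming_py : Prop := ∀ (text : String) (inside : Bool) (pending : String), Dom_strip_think_streaming_py text inside pending → Spec_strip_think_streaming_py text inside pending (strip_think_streaming_py text inside pending)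

-- ===== LEMMAS AND PROOFS =====

-- ---- specification of pvFindFrom (first-occurrence search) ----

theorem pvFindFrom_prefix (t sub : List Char) (i : Nat) :
    ∀ j, pvFindFrom t sub i = some j → sub <+: t.drop j := by
  induction i using pvFindFrom.induct t sub with
  | case1 i hle hpre =>
    intro j h; rw [pvFindFrom, if_pos hle, if_pos hpre] at h
    cases h; exact List.isPrefixOf_iff_prefix.mp hpre
  | case2 i hle hpre ih =>
    intro j h; rw [pvFindFrom, if_pos hle, if_neg hpre] at h; exact ih j h
  | case3 i hle =>
    intro j h; rw [pvFindFrom, if_neg hle] at h; cases h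

theorem pvFindFrom_min (t sub : List Char) (i : Nat) :
    ∀ j, pvFindFrom t sub i = some j → ∀ m, i ≤ m → m < j → ¬ sub <+: t.drop m := by
  induction i using pvFindFrom.induct t sub with
  | case1 i hle hpre =>
    intro j h; rw [pvFindFrom, if_pos hle, if_pos hpre] at h
    cases h; intro m h1 h2; omega
  | case2 i hle hpre ih =>
    intro j h; rw [pvFindFrom, if_pos hle, if_neg hpre] at h
    intro m h1 h2 hp
    rcases Nat.eq_or_lt_of_le h1 with rfl | h1'
    · exact hpre (List.isPrefixOf_iff_prefix.mpr hp)
    · exact ih j h m h1' h2 hp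
  | case3 i hle =>
    intro j h; rw [pvFindFrom, if_neg hle] at h; cases h

theorem pvFindFrom_none (t sub : List Char) (i : Nat) :
    pvFindFrom t sub i = none → ∀ m, i ≤ m → m + sub.length ≤ t.length → ¬ sub <+: t.drop m := by
  induction i using pvFindFrom.induct t sub with
  | case1 i hle hpre =>
    intro h; rw [pvFindFrom, if_pos hle, if_pos hpre] at h; cases h
  | case2 i hle hpre ih =>
    intro h; rw [pvFindFrom, if_pos hle, if_neg hpre] at h
    intro m h1 h2 hp
    rcases Nat.eq_or_lt_of_le h1 with rfl | h1'
    · exact hpre (List.isPrefixOf_iff_prefix.mpr hp)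
    · exact ih h m h1' h2 hp
  | case3 i hle =>
    intro _ m h1 h2 _; omega

theorem pvFindFrom_eq_some_of (t sub : List Char) (i : Nat) :
    ∀ j, i ≤ j → j + sub.length ≤ t.length → sub <+: t.drop j →
      (∀ m, i ≤ m → m < j → ¬ sub <+: t.drop m) → pvFindFrom t sub i = some j := by
  induction i using pvFindFrom.induct t sub with
  | case1 i hle hpre =>
    intro j hij _ hp hmin
    rcases Nat.eq_or_lt_of_le hij with rfl | hlt
    · rw [pvFindFrom, if_pos hle, if_pos hpre]
    · exact absurd (List.isPrefixOf_iff_prefix.mp hpre) (hmin i (le_refl _) hlt)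
  | case2 i hle hpre ih =>
    intro j hij hb hp hmin
    rw [pvFindFrom, if_pos hle, if_neg hpre]
    have hne : i ≠ j := by
      rintro rfl; exact hpre (List.isPrefixOf_iff_prefix.mpr hp)
    exact ih j (by omega) hb hp (fun m h1 h2 => hmin m (by omega) h2)
  | case3 i hle =>
    intro j hij hb _ _; omega

theorem pvFindFrom_eq_none_of (t sub : List Char) (i : Nat)
    (h : ∀ m, i ≤ m → m + sub.length ≤ t.length → ¬ sub <+: t.drop m) :
    pvFindFrom t sub i = none := by
  induction i using pvFindFrom.induct t sub with
  | case1 i hle hpre =>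
    exact absurd (List.isPrefixOf_iff_prefix.mp hpre) (h i (le_refl _) hle)
  | case2 i hle hpre ih =>
    rw [pvFindFrom, if_pos hle, if_neg hpre]
    exact ih (fun m h1 h2 => h m (by omega) h2)
  | case3 i hle =>
    rw [pvFindFrom, if_neg hle]

theorem prefix_drop_bound (t sub : List Char) (m : Nat) (hne : sub ≠ [])
    (h : sub <+: t.drop m) : m + sub.length ≤ t.length := by
  have h1 := h.length_le
  rw [List.length_drop] at h1
  have h2 : 0 < sub.length := List.length_pos_iff.mpr hne
  omega

-- find from index i equals find at 0 in the dropped tail, shifted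
theorem find_from_drop (t sub : List Char) (i : Nat) (hne : sub ≠ []) :
    pvFindFrom t sub i = (pvFindFrom (t.drop i) sub 0).map (· + i) := by
  cases h : pvFindFrom (t.drop i) sub 0 with
  | none =>
    simp only [Option.map_none]
    apply pvFindFrom_eq_none_of
    intro m h1 h2 hp
    have : sub <+: (t.drop i).drop (m - i) := by
      rw [List.drop_drop]
      have : i + (m - i) = m := by omega
      rw [this]; exact hp
    exact pvFindFrom_none (t.drop i) sub 0 h (m - i) (Nat.zero_le _)
      (by rw [List.length_drop]; have := prefix_drop_bound t sub m hne hp; omega) this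
  | some j =>
    simp only [Option.map_some]
    have hpos : 0 < sub.length := List.length_pos_iff.mpr hne
    have hp0 := pvFindFrom_prefix (t.drop i) sub 0 j h
    have hb := prefix_drop_bound (t.drop i) sub j hne hp0
    rw [List.length_drop] at hb
    rw [List.drop_drop] at hp0
    apply pvFindFrom_eq_some_of
    · omega
    · omega
    · rw [Nat.add_comm j i]; exact hp0
    · intro m h1 h2 hpm
      have hpm' : sub <+: (t.drop i).drop (m - i) := by
        rw [List.drop_drop]
        have : i + (m - i) = m := by omega
        rw [this]; exact hpm
      exact pvFindFrom_min (t.drop i) sub 0 j h (m - i) (Nat.zero_le _) (by omega) hpm'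

-- shift lemma: no occurrence starts before position q
theorem shift_find (tag s : List Char) (q : Nat) (hne : tag ≠ [])
    (hq : ∀ m, m < q → ¬ tag <+: s.drop m) :
    pvFindFrom s tag 0 = (pvFindFrom (s.drop q) tag 0).map (· + q) := by
  rw [← find_from_drop s tag q hne]
  cases h : pvFindFrom s tag q with
  | none =>
    apply pvFindFrom_eq_none_of
    intro m _ h2 hp
    by_cases hc : m < q
    · exact hq m hc hp
    · exact pvFindFrom_none s tag q h m (by omega) h2 hp
  | some j =>
    apply pvFindFrom_eq_some_of
    · exact Nat.zero_le _
    · exact (pvFindFrom_bounds s tag q j h).2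
    · exact pvFindFrom_prefix s tag q j h
    · intro m _ h2 hp
      by_cases hc : m < q
      · exact hq m hc hp
      · exact pvFindFrom_min s tag q j h m (by omega) h2 hp

-- ---- specification of pvKLoop (descending search for a trailing tag-prefix) ----

theorem pvKLoop_le (tag t : List Char) (K : Nat) : pvKLoop tag t K ≤ K := by
  induction K with
  | zero => simp [pvKLoop]
  | succ k ih =>
    rw [pvKLoop]; split
    · exact le_refl _
    · omega

theorem pvKLoop_good (tag t : List Char) (K : Nat) :
    tag.take (pvKLoop tag t K) = t.drop (t.length - pvKLoop tag t K) := by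
  induction K with
  | zero => simp [pvKLoop]
  | succ k ih =>
    rw [pvKLoop]; split
    · assumption
    · exact ih

theorem pvKLoop_max (tag t : List Char) (K : Nat) :
    ∀ m, m ≤ K → tag.take m = t.drop (t.length - m) → m ≤ pvKLoop tag t K := by
  induction K with
  | zero => intro m h _; omega
  | succ k ih =>
    intro m h hg
    rw [pvKLoop]; split
    · exact h
    · rename_i hne
      rcases Nat.eq_or_lt_of_le h with rfl | h'
      · exact absurd hg hne
      · exact ih m (by omega) hg

theorem pvKLoop_eq_of (tag t : List Char) (K k : Nat) (hk : k ≤ K)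
    (hg : tag.take k = t.drop (t.length - k))
    (hmax : ∀ m, k < m → m ≤ K → tag.take m ≠ t.drop (t.length - m)) :
    pvKLoop tag t K = k := by
  have h1 := pvKLoop_max tag t K k hk hg
  have h2 := pvKLoop_good tag t K
  have h3 := pvKLoop_le tag t K
  by_contra hne
  exact hmax (pvKLoop tag t K) (by omega) h3 h2

-- the longest trailing proper-tag-prefix, as A computes it for a region
def pvLtp (tag s : List Char) : Nat := pvKLoop tag s (min (tag.length - 1) s.length)

theorem pvLtp_le (tag s : List Char) : pvLtp tag s ≤ min (tag.length - 1) s.length :=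
  pvKLoop_le _ _ _

theorem pvLtp_full (tag buf : List Char) (h : buf <+: tag) (hlt : buf.length < tag.length) :
    pvLtp tag buf = buf.length := by
  unfold pvLtp
  apply pvKLoop_eq_of
  · omega
  · rw [Nat.sub_self, List.drop_zero]
    exact (List.prefix_iff_eq_take.mp h).symm
  · intro m h1 h2; omega

-- drops/takes of a suffix region agree with those of the whole string
theorem drop_region (s : List Char) (q m : Nat) (hq : q ≤ s.length) (hm : m ≤ s.length - q) :
    (s.drop q).drop ((s.drop q).length - m) = s.drop (s.length - m) := by
  rw [List.drop_drop, List.length_drop]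
  congr 1; omega

theorem pvLtp_shift (tag s : List Char) (q : Nat) (hq : q ≤ s.length)
    (hbig : ∀ m, s.length - q < m → m ≤ min (tag.length - 1) s.length →
      tag.take m ≠ s.drop (s.length - m)) :
    pvLtp tag s = pvLtp tag (s.drop q) := by
  unfold pvLtp
  have hlen : (s.drop q).length = s.length - q := List.length_drop ..
  set k := pvKLoop tag (s.drop q) (min (tag.length - 1) (s.drop q).length) with hk
  have hkle : k ≤ min (tag.length - 1) (s.drop q).length := pvKLoop_le _ _ _
  have hkg := pvKLoop_good tag (s.drop q) (min (tag.length - 1) (s.drop q).length)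
  apply pvKLoop_eq_of
  · omega
  · rw [← drop_region s q k hq (by omega)]; exact hkg
  · intro m h1 h2 hg
    by_cases hc : s.length - q < m
    · exact hbig m hc h2 hg
    · rw [← drop_region s q m hq (by omega)] at hg
      have := pvKLoop_max tag (s.drop q) (min (tag.length - 1) (s.drop q).length) m
        (by omega) hg
      omega

-- A's k-search over the full text with bound len-i equals the region search
theorem region_kloop (tag t : List Char) (i : Nat) (hi : i ≤ t.length) :
    pvKLoop tag t (min (tag.length - 1) (t.length - i)) = pvLtp tag (t.drop i) := by
  unfold pvLtp
  rw [List.length_drop]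
  have hK : min (tag.length - 1) (t.length - i) ≤ t.length - i := min_le_right _ _
  have hkle := pvKLoop_le tag (t.drop i) (min (tag.length - 1) (t.length - i))
  have hkg := pvKLoop_good tag (t.drop i) (min (tag.length - 1) (t.length - i))
  rw [List.length_drop] at hkg
  apply pvKLoop_eq_of
  · exact hkle
  · have hdr := drop_region t i (pvKLoop tag (t.drop i) (min (tag.length - 1) (t.length - i))) hi (by omega)
    rw [List.length_drop] at hdr
    rw [hkg, hdr]
  · intro m h1 h2 hg
    rw [← drop_region t i m hi (by omega)] at hg
    rw [List.length_drop] at hg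
    have := pvKLoop_max tag (t.drop i) (min (tag.length - 1) (t.length - i)) m (by omega)
      (by rw [List.length_drop]; exact hg)
    omega

-- ---- facts about the two tags ----

def pvTagOK (tag : List Char) : Prop :=
  2 ≤ tag.length ∧ tag.head? = some '<' ∧
    ∀ m (hm : m < tag.length), 0 < m → tag[m] ≠ '<'

theorem pvTagOK_zero (tag : List Char) (hOK : pvTagOK tag) (h0 : 0 < tag.length) :
    tag[0] = '<' := by
  cases tag with
  | nil => simp at h0
  | cons a l => simpa using hOK.2.1

theorem tagOK (inside : Bool) : pvTagOK (pvTag inside) := by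
  unfold pvTagOK
  cases inside <;> decide

theorem tag_ne_nil (inside : Bool) : pvTag inside ≠ [] := by
  cases inside <;> simp [pvTag, pvTagI, pvTagO]

-- ---- no occurrence can start inside the buffered partial match ----

-- the head of an occurrence equals the char at its start position
theorem occ_head (tag s : List Char) (pos : Nat) (h0 : 0 < tag.length)
    (hocc : tag <+: s.drop pos) (hpos : pos < s.length) :
    s[pos] = tag[0] := by
  have h1 : 0 < (s.drop pos).length := lt_of_lt_of_le h0 hocc.length_le
  have h2 := hocc.getElem h0
  rw [List.getElem_drop] at h2
  simpa using h2.symm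

-- a position strictly inside the buffered partial match cannot hold '<'
theorem buf_mid_ne_head (tag buf : List Char) (c : Char) (rest : List Char)
    (hOK : pvTagOK tag) (hpre : buf <+: tag) (hlt : buf.length < tag.length)
    (pos : Nat) (hpos : pos < buf.length) (hpz : 0 < pos)
    (h : (buf ++ c :: rest)[pos]'(by simp; omega) = tag[0]'(by omega)) : False := by
  have h1 : (buf ++ c :: rest)[pos]'(by simp; omega) = buf[pos] :=
    List.getElem_append_left hpos
  have h2 : buf[pos]'hpos = tag[pos]'(by omega) := hpre.getElem hpos
  have h3 : tag[0]'(by omega) = '<' := pvTagOK_zero tag hOK (by omega)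
  exact hOK.2.2 pos (by omega) hpz (by rw [← h2, ← h1, h, h3])

-- the char at the buffer's end position is c, not what the tag demands
theorem s_get_buflen (buf : List Char) (c : Char) (rest : List Char) :
    (buf ++ c :: rest)[buf.length]'(by simp) = c := by
  rw [List.getElem_append_right (le_refl _)]
  simp

theorem no_restart (tag buf : List Char) (c : Char) (rest : List Char)
    (hOK : pvTagOK tag) (hpre : buf <+: tag) (hlt : buf.length < tag.length)
    (hc : c ≠ tag[buf.length]) :
    ∀ pos, pos < buf.length → ¬ tag <+: (buf ++ c :: rest).drop pos := by
  intro pos hpos hocc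
  have h0 : 0 < tag.length := by omega
  have hhead := occ_head tag (buf ++ c :: rest) pos h0 hocc (by simp; omega)
  by_cases hpz : pos = 0
  · subst hpz
    rw [List.drop_zero] at hocc
    have h1 := hocc.getElem hlt
    exact hc (h1.trans (s_get_buflen buf c rest)).symm
  · exact buf_mid_ne_head tag buf c rest hOK hpre hlt pos hpos (by omega) hhead

theorem no_restart_c (tag buf : List Char) (c : Char) (rest : List Char)
    (hOK : pvTagOK tag) (h0 : 0 < tag.length) (hc0 : c ≠ tag[0]'h0) (hpre : buf <+: tag) :
    ¬ tag <+: (buf ++ c :: rest).drop buf.length := by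
  rw [List.drop_left]
  intro hocc
  have h2 := hocc.getElem h0
  simp only [List.getElem_cons_zero] at h2
  exact hc0 h2.symm

theorem no_tail (tag buf : List Char) (c : Char) (rest : List Char)
    (hOK : pvTagOK tag) (hpre : buf <+: tag) (hlt : buf.length < tag.length)
    (hc : c ≠ tag[buf.length]) :
    ∀ m, (buf ++ c :: rest).length - buf.length < m →
      m ≤ min (tag.length - 1) (buf ++ c :: rest).length →
      tag.take m ≠ (buf ++ c :: rest).drop ((buf ++ c :: rest).length - m) := by
  intro m h1 h2 heq
  have hsl : (buf ++ c :: rest).length = buf.length + rest.length + 1 := by simp; omega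
  have hm1 : 0 < m := by omega
  have hml : m ≤ tag.length - 1 := by omega
  have hms : m ≤ (buf ++ c :: rest).length := by omega
  have hocc : tag.take m <+: (buf ++ c :: rest).drop ((buf ++ c :: rest).length - m) :=
    heq ▸ List.prefix_refl _
  have h0m : 0 < (tag.take m).length := by simp; omega
  have hhead := occ_head (tag.take m) (buf ++ c :: rest) ((buf ++ c :: rest).length - m)
    h0m hocc (by omega)
  rw [List.getElem_take] at hhead
  by_cases hpz : (buf ++ c :: rest).length - m = 0
  · have hmeq : m = (buf ++ c :: rest).length := by omega
    rw [hpz, List.drop_zero] at heq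
    have hb : (buf ++ c :: rest)[buf.length]'(by simp) = (tag.take m)[buf.length]'(by simp; omega) :=
      List.getElem_of_eq heq.symm _
    rw [List.getElem_take, s_get_buflen] at hb
    exact hc hb
  · exact buf_mid_ne_head tag buf c rest hOK hpre hlt _ (by omega) (by omega) hhead

theorem no_tail_c (tag buf : List Char) (c : Char) (rest : List Char)
    (hOK : pvTagOK tag) (hpre : buf <+: tag) (hlt : buf.length < tag.length)
    (hc : c ≠ tag[buf.length]) (h0 : 0 < tag.length) (hc0 : c ≠ tag[0]'h0) :
    ∀ m, (buf ++ c :: rest).length - (buf.length + 1) < m →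
      m ≤ min (tag.length - 1) (buf ++ c :: rest).length →
      tag.take m ≠ (buf ++ c :: rest).drop ((buf ++ c :: rest).length - m) := by
  intro m h1 h2 heq
  have hsl : (buf ++ c :: rest).length = buf.length + rest.length + 1 := by simp; omega
  by_cases hbig : (buf ++ c :: rest).length - buf.length < m
  · exact no_tail tag buf c rest hOK hpre hlt hc m hbig h2 heq
  · -- the trailing prefix starts exactly at the char c
    have hpos : (buf ++ c :: rest).length - m = buf.length := by omega
    rw [hpos] at heq
    have hm1 : 0 < m := by omega
    have hocc : tag.take m <+: (buf ++ c :: rest).drop buf.length := heq ▸ List.prefix_refl _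
    have h0m : 0 < (tag.take m).length := by simp; omega
    have hhead := occ_head (tag.take m) (buf ++ c :: rest) buf.length h0m hocc (by simp)
    rw [List.getElem_take, s_get_buflen] at hhead
    exact hc0 hhead

-- ---- the FSM characterised by first occurrence / longest trailing prefix ----

theorem prefix_extend (buf tag : List Char) (c : Char) (h : buf <+: tag)
    (hlt : buf.length < tag.length) (hc : tag[buf.length] = c) : buf ++ [c] <+: tag := by
  rw [List.prefix_iff_eq_take] at h ⊢
  rw [List.length_append, List.length_singleton, ← List.take_append_getElem hlt, hc, ← h]

theorem head_prefix (tag : List Char) (h : 0 < tag.length) : [tag[0]] <+: tag := by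
  cases tag with
  | nil => simp at h
  | cons a l => exact ⟨l, rfl⟩

theorem fsm_char (inside : Bool) : ∀ (r buf acc : List Char),
    buf <+: pvTag inside → buf.length < (pvTag inside).length →
    pvFsm r (inside, buf, acc) =
      (match pvFindFrom (buf ++ r) (pvTag inside) 0 with
       | some j => pvFsm ((buf ++ r).drop (j + (pvTag inside).length))
           (!inside, [], acc ++ (if inside then [] else (buf ++ r).take j))
       | none =>
         (inside,
          (buf ++ r).drop ((buf ++ r).length - pvLtp (pvTag inside) (buf ++ r)),
          acc ++ (if inside then []
                  else (buf ++ r).take ((buf ++ r).length - pvLtp (pvTag inside) (buf ++ r))))) := by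
  intro r
  induction r with
  | nil =>
    intro buf acc hpre hlt
    have hfind : pvFindFrom (buf ++ [] : List Char) (pvTag inside) 0 = none := by
      apply pvFindFrom_eq_none_of
      intro m hm hb _
      simp at hb; omega
    rw [hfind]
    simp only [List.append_nil] at *
    rw [pvLtp_full _ _ hpre hlt]
    simp only [Nat.sub_self, List.drop_zero, List.take_zero]
    cases inside <;> simp [pvFsm]
  | cons c r ih =>
    intro buf acc hpre hlt
    have hOK := tagOK inside
    have h0 : 0 < (pvTag inside).length := by have := hOK.1; omega
    have hgetD : (pvTag inside).getD buf.length ' ' = (pvTag inside)[buf.length] :=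
      List.getD_eq_getElem _ _ hlt
    have hstep : pvFsm (c :: r) (inside, buf, acc) = pvFsm r (pvStep (inside, buf, acc) c) := rfl
    by_cases hc : c = (pvTag inside)[buf.length]
    · have hbuf' : buf ++ [c] <+: pvTag inside := prefix_extend buf _ c hpre hlt hc.symm
      by_cases hfull : buf.length + 1 = (pvTag inside).length
      · have htag : buf ++ [c] = pvTag inside := hbuf'.eq_of_length (by simp; omega)
        have hstv : pvStep (inside, buf, acc) c = (!inside, [], acc) := by
          simp only [pvStep, hgetD, if_pos hc, List.length_append, List.length_singleton]
          rw [if_pos hfull]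
        have hs : buf ++ c :: r = pvTag inside ++ r := by rw [← htag]; simp
        have hfind : pvFindFrom (buf ++ c :: r) (pvTag inside) 0 = some 0 := by
          apply pvFindFrom_eq_some_of
          · exact le_refl _
          · simp [hs]
          · rw [List.drop_zero, hs]; exact List.prefix_append _ _
          · intro m _ hm; omega
        rw [hstep, hstv, hfind]
        have hdrop : (buf ++ c :: r).drop ((pvTag inside).length) = r := by
          rw [hs]; exact List.drop_left
        cases inside <;> simp [hdrop]
      · have hlt' : (buf ++ [c]).length < (pvTag inside).length := by simp; omega
        have hstv : pvStep (inside, buf, acc) c = (inside, buf ++ [c], acc) := by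
          simp only [pvStep, hgetD, if_pos hc, List.length_append, List.length_singleton]
          rw [if_neg hfull]
        rw [hstep, hstv, ih (buf ++ [c]) acc hbuf' hlt']
        have hre : (buf ++ [c]) ++ r = buf ++ c :: r := by simp
        rw [hre]
    · -- mismatch: the buffered partial match is flushed
      have hnr := no_restart (pvTag inside) buf c r hOK hpre hlt hc
      by_cases hc0 : c = (pvTag inside)[0]
      · -- c restarts a fresh tag match
        have hpre1 : [c] <+: pvTag inside := by rw [hc0]; exact head_prefix _ h0
        have hlt1 : ([c] : List Char).length < (pvTag inside).length := by
          have := hOK.1; simp only [List.length_cons, List.length_nil]; omega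
        have hstv : pvStep (inside, buf, acc) c =
            (inside, [c], if inside then acc else acc ++ buf) := by
          simp only [pvStep, hgetD, if_neg hc]
          rw [if_pos (by rw [List.getD_eq_getElem _ _ h0]; exact hc0)]
        have hshift := shift_find (pvTag inside) (buf ++ c :: r) buf.length
          (tag_ne_nil inside) hnr
        rw [List.drop_left] at hshift
        have hq : buf.length ≤ (buf ++ c :: r).length := by simp
        rw [hstep, hstv, ih [c] _ hpre1 hlt1, List.singleton_append]
        cases hf : pvFindFrom (c :: r) (pvTag inside) 0 with
        | some j =>
          rw [hshift, hf]
          simp only [Option.map_some]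
          have hd : (buf ++ c :: r).drop (j + buf.length + (pvTag inside).length) =
              (c :: r).drop (j + (pvTag inside).length) := by
            rw [show j + buf.length + (pvTag inside).length
                  = buf.length + (j + (pvTag inside).length) by omega]
            exact List.drop_length_add_append _
          have ht : (buf ++ c :: r).take (j + buf.length) = buf ++ (c :: r).take j := by
            rw [show j + buf.length = buf.length + j by omega]
            exact List.take_length_add_append _
          cases inside <;> simp [hd, ht, List.append_assoc]
        | none =>
          rw [hshift, hf]
          simp only [Option.map_none]
          have hnt := no_tail (pvTag inside) buf c r hOK hpre hlt hc
          have hltp : pvLtp (pvTag inside) (buf ++ c :: r) = pvLtp (pvTag inside) (c :: r) := by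
            rw [pvLtp_shift (pvTag inside) (buf ++ c :: r) buf.length hq hnt, List.drop_left]
          have hple : pvLtp (pvTag inside) (c :: r) ≤ r.length + 1 := by
            have := pvLtp_le (pvTag inside) (c :: r); simp at this; omega
          cases inside <;>
            simp [hltp, Nat.add_sub_assoc hple, List.drop_length_add_append,
              List.take_length_add_append, List.append_assoc]
      · -- c is dropped/emitted as plain text
        have hstv : pvStep (inside, buf, acc) c =
            (inside, [],
              if inside then acc else (acc ++ buf) ++ [c]) := by
          simp only [pvStep, hgetD, if_neg hc]
          rw [if_neg (by rw [List.getD_eq_getElem _ _ h0]; exact hc0)]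
          cases inside <;> simp
        have hnrc := no_restart_c (pvTag inside) buf c r hOK h0 hc0 hpre
        have hq1 : ∀ m, m < buf.length + 1 → ¬ pvTag inside <+: (buf ++ c :: r).drop m := by
          intro m hm
          rcases Nat.lt_or_ge m buf.length with h | h
          · exact hnr m h
          · have : m = buf.length := by omega
            rw [this]; exact hnrc
        have hshift := shift_find (pvTag inside) (buf ++ c :: r) (buf.length + 1)
          (tag_ne_nil inside) hq1
        have hsplit : buf ++ c :: r = (buf ++ [c]) ++ r := by simp
        have hdl : (buf ++ c :: r).drop (buf.length + 1) = r := by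
          rw [hsplit, show buf.length + 1 = (buf ++ [c]).length by simp]
          exact List.drop_left
        rw [hdl] at hshift
        have hq : buf.length + 1 ≤ (buf ++ c :: r).length := by simp
        rw [hstep, hstv, ih [] _ (List.nil_prefix) (by simpa using h0), List.nil_append]
        cases hf : pvFindFrom r (pvTag inside) 0 with
        | some j =>
          rw [hshift, hf]
          simp only [Option.map_some]
          have hd : (buf ++ c :: r).drop (j + (buf.length + 1) + (pvTag inside).length) =
              r.drop (j + (pvTag inside).length) := by
            rw [hsplit, show j + (buf.length + 1) + (pvTag inside).length
                  = (buf ++ [c]).length + (j + (pvTag inside).length) by simp; omega]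
            exact List.drop_length_add_append _
          have ht : (buf ++ c :: r).take (j + (buf.length + 1)) = (buf ++ [c]) ++ r.take j := by
            rw [hsplit, show j + (buf.length + 1) = (buf ++ [c]).length + j by simp; omega]
            exact List.take_length_add_append _
          cases inside <;> simp [hd, ht, List.append_assoc]
        | none =>
          rw [hshift, hf]
          simp only [Option.map_none]
          have hnt := no_tail_c (pvTag inside) buf c r hOK hpre hlt hc h0 hc0
          have hltp : pvLtp (pvTag inside) (buf ++ c :: r) = pvLtp (pvTag inside) r := by
            rw [pvLtp_shift (pvTag inside) (buf ++ c :: r) (buf.length + 1) hq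
              (by simpa using hnt), hdl]
          have hple : pvLtp (pvTag inside) r ≤ r.length := by
            have := pvLtp_le (pvTag inside) r; omega
          have hd' : List.drop (buf.length + (r.length + 1) - pvLtp (pvTag inside) r) (buf ++ c :: r)
              = List.drop (r.length - pvLtp (pvTag inside) r) r := by
            rw [hsplit, show buf.length + (r.length + 1) - pvLtp (pvTag inside) r
                  = (buf ++ [c]).length + (r.length - pvLtp (pvTag inside) r) by simp; omega]
            exact List.drop_length_add_append _
          have ht' : List.take (buf.length + (r.length + 1) - pvLtp (pvTag inside) r) (buf ++ c :: r)
              = (buf ++ [c]) ++ List.take (r.length - pvLtp (pvTag inside) r) r := by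
            rw [hsplit, show buf.length + (r.length + 1) - pvLtp (pvTag inside) r
                  = (buf ++ [c]).length + (r.length - pvLtp (pvTag inside) r) by simp; omega]
            exact List.take_length_add_append _
          cases inside <;> simp [hltp, hd', ht', List.append_assoc]

-- ---- the main simulation ----

theorem main_aux : ∀ (n : Nat) (t : List Char) (i : Nat) (inside : Bool) (acc : List Char),
    t.length - i ≤ n →
    pvALoop t i inside acc =
      (let st := pvFsm (t.drop i) (inside, [], acc); (st.2.2, st.1, st.2.1)) := by
  intro n
  induction n with
  | zero =>
    intro t i inside acc h
    have hge : t.length ≤ i := by omega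
    rw [pvALoop, dif_neg (by omega), List.drop_eq_nil_of_le hge]
    rfl
  | succ n ihn =>
    intro t i inside acc h
    by_cases hlt : i < t.length
    · have hchar := fsm_char inside (t.drop i) [] acc List.nil_prefix
        (by have := (tagOK inside).1; simp only [List.length_nil]; omega)
      simp only [List.nil_append] at hchar
      have hz : (List.drop i t).drop (t.length - i) = [] :=
        List.drop_eq_nil_of_le (by simp)
      cases inside with
      | true =>
        simp only [pvTag] at hchar
        have hne : pvTagI ≠ [] := by simp [pvTagI]
        have h8 : pvTagI.length = 8 := by simp [pvTagI]
        have hff := find_from_drop t pvTagI i hne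
        rw [pvALoop, dif_pos hlt, if_pos rfl]
        cases hfo : pvFindFrom (t.drop i) pvTagI 0 with
        | some j =>
          have hft : pvFindFrom t pvTagI i = some (j + i) := by rw [hff, hfo]; rfl
          have hb := pvFindFrom_bounds t pvTagI i (j + i) hft
          have hih := ihn t ((j + i) + pvTagI.length) false acc (by omega)
          have hdd : (t.drop i).drop (j + pvTagI.length) = t.drop (j + i + pvTagI.length) := by
            rw [List.drop_drop]; congr 1; omega
          rw [hft, hchar, hfo]
          simp only [hdd, hih, Bool.not_true]
          simp
        | none =>
          have hft : pvFindFrom t pvTagI i = none := by rw [hff, hfo]; rfl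
          rw [hft, hchar, hfo]
          have hrk := region_kloop pvTagI t i (by omega)
          have hple : pvLtp pvTagI (t.drop i) ≤ t.length - i := by
            have := pvLtp_le pvTagI (t.drop i)
            rw [List.length_drop] at this; omega
          have hdr := drop_region t i (pvLtp pvTagI (t.drop i)) (by omega) hple
          rw [List.length_drop] at hdr
          by_cases hk : pvLtp pvTagI (t.drop i) = 0
          · rw [hk] at hrk
            simp [hrk, hk, hz]
          · simp [hrk, hk, hdr]
      | false =>
        simp only [pvTag] at hchar
        have hne : pvTagO ≠ [] := by simp [pvTagO]
        have h7 : pvTagO.length = 7 := by simp [pvTagO]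
        have hff := find_from_drop t pvTagO i hne
        rw [pvALoop, dif_pos hlt, if_neg (by simp)]
        cases hfo : pvFindFrom (t.drop i) pvTagO 0 with
        | some j =>
          have hft : pvFindFrom t pvTagO i = some (j + i) := by rw [hff, hfo]; rfl
          have hb := pvFindFrom_bounds t pvTagO i (j + i) hft
          have hji : j + i - i = j := by omega
          have hih := ihn t ((j + i) + pvTagO.length) true
            (acc ++ (t.drop i).take j) (by omega)
          have hdd : (t.drop i).drop (j + pvTagO.length) = t.drop (j + i + pvTagO.length) := by
            rw [List.drop_drop]; congr 1; omega
          rw [hft, hchar, hfo]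
          simp only [hji, hdd, hih, Bool.not_false]
          simp
        | none =>
          have hft : pvFindFrom t pvTagO i = none := by rw [hff, hfo]; rfl
          rw [hft, hchar, hfo]
          have hrk := region_kloop pvTagO t i (by omega)
          have hple : pvLtp pvTagO (t.drop i) ≤ t.length - i := by
            have := pvLtp_le pvTagO (t.drop i)
            rw [List.length_drop] at this; omega
          have hdr := drop_region t i (pvLtp pvTagO (t.drop i)) (by omega) hple
          rw [List.length_drop] at hdr
          have h4 : (List.drop i t).take (t.length - i) = List.drop i t := by
            rw [← List.length_drop]; exact List.take_length
          by_cases hk : pvLtp pvTagO (t.drop i) = 0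
          · rw [hk] at hrk
            simp [hrk, hk, hz, h4]
          · have htk' : t.length - i - pvLtp pvTagO (t.drop i)
                = t.length - pvLtp pvTagO (t.drop i) - i := by omega
            simp [hrk, hk, htk']
            omega
    · rw [pvALoop, dif_neg hlt, List.drop_eq_nil_of_le (by omega)]
      rfl

theorem main_lemma : ∀ (t : List Char) (i : Nat) (inside : Bool) (acc : List Char),
    pvALoop t i inside acc =
      (let st := pvFsm (t.drop i) (inside, [], acc); (st.2.2, st.1, st.2.1)) := by
  intro t i inside acc
  exact main_aux t.length t i inside acc (by omega)

-- ===== VERDICT (by name: the statement is the Claim_ definition above) =====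
theorem strip_think_streaming_py_spec : Claim_equal_strip_think_streaming_py := by
  intro text inside pending _
  unfold Spec_strip_think_streaming_py strip_think_streaming_py strip_think_streaming_py_alt
  simp only [main_lemma, List.drop_zero]
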